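-- pv_equiv track=rewrite | github.com/aljinovic-ante/GraphAlgorithm | 3. Vježba/aljinovic_ante_3.py | provjera
-- ===== SOURCE A (Python) =====
-- def provjera(matrix):
--     for j in range(len(matrix[0])):
--         zbroj_1=0
--         for i in range(len(matrix)):
--             if(matrix[i][j]!=1 and matrix[i][j]!=0):
--                 return False
--             else:
--                 zbroj_1+=matrix[i][j]
--         if(zbroj_1!=2):
--             return False
--     return True
-- ===== SOURCE B (Python) =====
-- def provjera(matrix):
--     cols = len(matrix[0])
--     sums = [0] * cols
--     for row in matrix:
--         vals = [row[j] for j in range(cols)]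
--         if any(v != 0 and v != 1 for v in vals):
--             return False
--         sums = [s + v for s, v in zip(sums, vals)]
--     return all(s == 2 for s in sums)
-- ===== Notes on version B (the rewrite author's own statement) =====
-- stated objective: alternative
-- what changed: A scans column-major with a fresh scalar accumulator and an early sum check per column; B makes a single row-major pass maintaining a vector of per-column sums (validating each row's entries as it goes) and checks all sums equal 2 at the end.
-- outside the precondition, e.g. on provjera([[0, 0], [1]]): A returns False, B raises IndexError
import Mathlib
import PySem

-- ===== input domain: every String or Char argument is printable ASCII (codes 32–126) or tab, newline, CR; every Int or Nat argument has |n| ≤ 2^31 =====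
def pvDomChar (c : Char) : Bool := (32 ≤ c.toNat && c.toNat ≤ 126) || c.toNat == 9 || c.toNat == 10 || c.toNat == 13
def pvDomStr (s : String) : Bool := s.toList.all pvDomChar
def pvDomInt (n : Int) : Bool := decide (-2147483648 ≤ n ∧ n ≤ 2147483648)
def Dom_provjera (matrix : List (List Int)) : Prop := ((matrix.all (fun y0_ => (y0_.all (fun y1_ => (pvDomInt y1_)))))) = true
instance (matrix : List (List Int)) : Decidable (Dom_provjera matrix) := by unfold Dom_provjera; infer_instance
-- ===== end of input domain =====

-- B replaces A's column-major double loop (fresh scalar sum per column, early sum check)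
-- by a single row-major pass maintaining a vector of column sums checked once at the end
-- (objective: alternative decomposition, same O(n·m) cost). Return values only; neither
-- program mutates its argument.


-- ===== PORT A =====
-- inner 'for i in range(len(matrix))' loop: none = 'return False', some zbroj_1 otherwise
def provjeraInner (matrix : List (List Int)) (j : Int) : List Int → Int → Option Int
  | [], z => some z
  | i :: rest, z =>
      let v := PySem.List.pyGetD (PySem.List.pyGetD matrix i []) j 0
      if v ≠ 1 ∧ v ≠ 0 then none
      else provjeraInner matrix j rest (z + v)

-- outer 'for j in range(len(matrix[0]))' loop
def provjeraOuter (matrix : List (List Int)) : List Int → Bool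
  | [] => true
  | j :: rest =>
      match provjeraInner matrix j (PySem.List.pyRange 0 (PySem.List.len matrix) 1) 0 with
      | none => false
      | some z => if z ≠ 2 then false else provjeraOuter matrix rest

-- indexing is total via pyGetD; Pre_provjera guarantees every access Python makes is in range
def provjera (matrix : List (List Int)) : Bool :=
  provjeraOuter matrix
    (PySem.List.pyRange 0 (PySem.List.len (PySem.List.pyGetD matrix 0 [])) 1)

-- ===== PORT B =====
-- 'for row in matrix' loop of Source B: none = 'return False', some sums = fall through
def provjeraAltLoop (J : List Int) : List (List Int) → List Int → Option (List Int)
  | [], sums => some sums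
  | row :: rest, sums =>
      let vals := J.map (fun j => PySem.List.pyGetD row j 0)
      if vals.any (fun v => v ≠ 0 ∧ v ≠ 1) then none
      else provjeraAltLoop J rest (List.zipWith (· + ·) sums vals)

def provjera_alt (matrix : List (List Int)) : Bool :=
  let cols := (PySem.List.pyGetD matrix 0 []).length
  let J := PySem.List.pyRange 0 cols 1
  match provjeraAltLoop J matrix (List.replicate cols (0 : Int)) with
  | none => false
  | some sums => sums.all (fun s => s == 2)

-- ===== PRECONDITION & SPEC =====
-- Pre_ excludes the empty matrix (A raises IndexError on matrix[0]) and ragged matrices with a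
-- row shorter than row 0 — there Python raises IndexError in whichever of the two traversal
-- orders reaches the short row first, so A may return False where B raises (see cites) — except
-- when the very first entry matrix[0][0] is already invalid, where both return False at once.
def Pre_provjera (matrix : List (List Int)) : Prop :=
  matrix ≠ [] ∧ ((∀ row ∈ matrix, matrix.headI.length ≤ row.length) ∨
    (matrix.headI ≠ [] ∧ matrix.headI.headI ≠ 0 ∧ matrix.headI.headI ≠ 1))
instance (matrix : List (List Int)) : Decidable (Pre_provjera matrix) := by unfold Pre_provjera; infer_instance

def pvWitness_provjera : List (List Int) := [[1, 0], [1, 0], [0, 1], [0, 1]]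

def Spec_provjera (matrix : List (List Int)) (out : Bool) : Prop := out = provjera_alt matrix
instance (matrix : List (List Int)) (out : Bool) : Decidable (Spec_provjera matrix out) := by unfold Spec_provjera; infer_instance

-- ===== CLAIM (what is proved, stated in full; the proofs are below) =====
def Claim_equal_provjera : Prop := ∀ (matrix : List (List Int)), Dom_provjera matrix → Pre_provjera matrix → Spec_provjera matrix (provjera matrix)

-- ===== LEMMAS AND PROOFS =====

lemma inner_char (matrix : List (List Int)) (j : Int) (L : List Int) (z : Int) :
    provjeraInner matrix j L z =
      if ∀ i ∈ L, PySem.List.pyGetD (PySem.List.pyGetD matrix i []) j 0 = 1 ∨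
                  PySem.List.pyGetD (PySem.List.pyGetD matrix i []) j 0 = 0
      then some (z + (L.map (fun i => PySem.List.pyGetD (PySem.List.pyGetD matrix i []) j 0)).sum)
      else none := by
  induction L generalizing z with
  | nil => simp [provjeraInner]
  | cons i rest ih =>
      simp only [provjeraInner]
      simp only [List.forall_mem_cons]
      by_cases h : PySem.List.pyGetD (PySem.List.pyGetD matrix i []) j 0 = 1 ∨
          PySem.List.pyGetD (PySem.List.pyGetD matrix i []) j 0 = 0
      · rw [if_neg (by tauto), ih]
        by_cases hrest : ∀ i' ∈ rest,
            PySem.List.pyGetD (PySem.List.pyGetD matrix i' []) j 0 = 1 ∨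
            PySem.List.pyGetD (PySem.List.pyGetD matrix i' []) j 0 = 0
        · rw [if_pos hrest, if_pos ⟨h, hrest⟩]
          simp [add_assoc]
        · rw [if_neg hrest, if_neg (fun hc => hrest hc.2)]
      · rw [if_pos (by tauto), if_neg (fun hc => h hc.1)]

lemma outer_char (matrix : List (List Int)) (Js : List Int) :
    provjeraOuter matrix Js = true ↔
      ∀ j ∈ Js,
        (∀ i ∈ PySem.List.pyRange 0 (PySem.List.len matrix) 1,
            PySem.List.pyGetD (PySem.List.pyGetD matrix i []) j 0 = 1 ∨
            PySem.List.pyGetD (PySem.List.pyGetD matrix i []) j 0 = 0) ∧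
        ((PySem.List.pyRange 0 (PySem.List.len matrix) 1).map
            (fun i => PySem.List.pyGetD (PySem.List.pyGetD matrix i []) j 0)).sum = 2 := by
  induction Js with
  | nil => simp [provjeraOuter]
  | cons j rest ih =>
      simp only [provjeraOuter]
      rw [inner_char, List.forall_mem_cons]
      by_cases h : ∀ i ∈ PySem.List.pyRange 0 (PySem.List.len matrix) 1,
          PySem.List.pyGetD (PySem.List.pyGetD matrix i []) j 0 = 1 ∨
          PySem.List.pyGetD (PySem.List.pyGetD matrix i []) j 0 = 0
      · rw [if_pos h]
        show (if (0 + ((PySem.List.pyRange 0 (PySem.List.len matrix) 1).map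
            (fun i => PySem.List.pyGetD (PySem.List.pyGetD matrix i []) j 0)).sum) ≠ 2 then false
          else provjeraOuter matrix rest) = true ↔ _
        rw [zero_add]
        by_cases hs : ((PySem.List.pyRange 0 (PySem.List.len matrix) 1).map
            (fun i => PySem.List.pyGetD (PySem.List.pyGetD matrix i []) j 0)).sum = 2
        · rw [if_neg (by omega), ih]
          constructor
          · exact fun hr => ⟨⟨h, hs⟩, hr⟩
          · exact fun hc => hc.2
        · rw [if_pos hs]
          show false = true ↔ _
          simp only [Bool.false_eq_true, false_iff]
          exact fun hc => hs hc.1.2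
      · rw [if_neg h]
        show false = true ↔ _
        simp only [Bool.false_eq_true, false_iff]
        exact fun hc => h hc.1.1

lemma zipWith_add_map (J : List Int) (f g : Int → Int) :
    List.zipWith (· + ·) (J.map f) (J.map g) = J.map (fun j => f j + g j) := by
  induction J with
  | nil => rfl
  | cons j rest ih => simp [ih]

lemma alt_loop_char (J : List Int) (rows : List (List Int)) (f : Int → Int) :
    provjeraAltLoop J rows (J.map f) =
      if ∀ row ∈ rows, ∀ j ∈ J, PySem.List.pyGetD row j 0 = 1 ∨ PySem.List.pyGetD row j 0 = 0
      then some (J.map (fun j => f j + ((rows.map (fun r => PySem.List.pyGetD r j 0)).sum)))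
      else none := by
  induction rows generalizing f with
  | nil => simp [provjeraAltLoop]
  | cons row rest ih =>
      simp only [provjeraAltLoop]
      simp only [List.forall_mem_cons]
      by_cases hrow : ∀ j ∈ J, PySem.List.pyGetD row j 0 = 1 ∨ PySem.List.pyGetD row j 0 = 0
      · have hany : ¬ ((J.map (fun j => PySem.List.pyGetD row j 0)).any
            (fun v => decide (v ≠ 0 ∧ v ≠ 1)) = true) := by
          simp only [List.any_eq_true, List.mem_map, decide_eq_true_eq]
          rintro ⟨v, ⟨j, hj, rfl⟩, hv⟩
          rcases hrow j hj with h1 | h1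
          exacts [hv.2 h1, hv.1 h1]
        rw [if_neg hany, zipWith_add_map J f (fun j => PySem.List.pyGetD row j 0),
          ih (fun j => f j + PySem.List.pyGetD row j 0)]
        by_cases hrest : ∀ r ∈ rest, ∀ j ∈ J,
            PySem.List.pyGetD r j 0 = 1 ∨ PySem.List.pyGetD r j 0 = 0
        · rw [if_pos hrest, if_pos ⟨hrow, hrest⟩]
          simp [add_assoc]
        · rw [if_neg hrest, if_neg (fun hc => hrest hc.2)]
      · have hany : (J.map (fun j => PySem.List.pyGetD row j 0)).any
            (fun v => decide (v ≠ 0 ∧ v ≠ 1)) = true := by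
          push Not at hrow
          obtain ⟨j, hj, hne⟩ := hrow
          simp only [List.any_eq_true, List.mem_map, decide_eq_true_eq]
          exact ⟨PySem.List.pyGetD row j 0, ⟨j, hj, rfl⟩, hne.2, hne.1⟩
        rw [if_pos hany, if_neg (fun hc => hrow hc.1)]

-- '∀ i over range(len(matrix)) of matrix[i]' is '∀ row over matrix'
lemma forall_range_iff (matrix : List (List Int)) (P : List Int → Prop) :
    (∀ i ∈ PySem.List.pyRange 0 (PySem.List.len matrix) 1, P (PySem.List.pyGetD matrix i [])) ↔
    ∀ r ∈ matrix, P r := by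
  constructor
  · intro h r hr
    obtain ⟨n, hn, rfl⟩ := List.mem_iff_getElem.mp hr
    have h0 : PySem.List.pyGetD matrix (n : Int) [] = matrix[n] := by
      rw [PySem.List.pyGetD_natCast]
      exact List.getD_eq_getElem matrix [] hn
    rw [← h0]
    exact h n (by rw [PySem.List.mem_pyRange_one]; simp; omega)
  · intro h i hi
    rw [PySem.List.mem_pyRange_one] at hi
    simp only [PySem.List.len_eq] at hi
    have hin : PySem.Raise.InRange matrix.length i := by simp [PySem.Raise.InRange]; omega
    exact h _ (PySem.List.pyGetD_mem matrix [] hin)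

lemma map_entry_rows (matrix : List (List Int)) (j : Int) :
    (PySem.List.pyRange 0 (PySem.List.len matrix) 1).map
        (fun i => PySem.List.pyGetD (PySem.List.pyGetD matrix i []) j 0)
      = matrix.map (fun r => PySem.List.pyGetD r j 0) := by
  calc (PySem.List.pyRange 0 (PySem.List.len matrix) 1).map
          (fun i => PySem.List.pyGetD (PySem.List.pyGetD matrix i []) j 0)
      = ((PySem.List.pyRange 0 (PySem.List.len matrix) 1).map
          (fun i => PySem.List.pyGetD matrix i [])).map (fun r => PySem.List.pyGetD r j 0) := by
        rw [List.map_map]; rfl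
    _ = matrix.map (fun r => PySem.List.pyGetD r j 0) := by
        rw [PySem.List.map_pyGetD_pyRange_zero]

lemma provjera_true_iff (matrix : List (List Int)) :
    provjera matrix = true ↔
      ∀ j ∈ PySem.List.pyRange 0 ((PySem.List.pyGetD matrix 0 []).length) 1,
        (∀ r ∈ matrix, PySem.List.pyGetD r j 0 = 1 ∨ PySem.List.pyGetD r j 0 = 0) ∧
        (matrix.map (fun r => PySem.List.pyGetD r j 0)).sum = 2 := by
  unfold provjera
  rw [outer_char]
  refine forall₂_congr (fun j _ => ?_)
  rw [map_entry_rows, forall_range_iff matrix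
    (fun r => PySem.List.pyGetD r j 0 = 1 ∨ PySem.List.pyGetD r j 0 = 0)]

lemma provjera_alt_true_iff (matrix : List (List Int)) :
    provjera_alt matrix = true ↔
      (∀ r ∈ matrix, ∀ j ∈ PySem.List.pyRange 0 ((PySem.List.pyGetD matrix 0 []).length) 1,
          PySem.List.pyGetD r j 0 = 1 ∨ PySem.List.pyGetD r j 0 = 0) ∧
      (∀ j ∈ PySem.List.pyRange 0 ((PySem.List.pyGetD matrix 0 []).length) 1,
          (matrix.map (fun r => PySem.List.pyGetD r j 0)).sum = 2) := by
  show (match provjeraAltLoop (PySem.List.pyRange 0 ((PySem.List.pyGetD matrix 0 []).length) 1)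
          matrix (List.replicate (PySem.List.pyGetD matrix 0 []).length (0 : Int)) with
        | none => false
        | some sums => sums.all (fun s => s == 2)) = true ↔ _
  have hrepl : List.replicate (PySem.List.pyGetD matrix 0 []).length (0 : Int)
      = (PySem.List.pyRange 0 ((PySem.List.pyGetD matrix 0 []).length) 1).map (fun _ => (0 : Int)) := by
    rw [List.map_const', PySem.List.length_pyRange_one]
    simp
  rw [hrepl, alt_loop_char]
  by_cases h : ∀ row ∈ matrix, ∀ j ∈ PySem.List.pyRange 0 ((PySem.List.pyGetD matrix 0 []).length) 1,
      PySem.List.pyGetD row j 0 = 1 ∨ PySem.List.pyGetD row j 0 = 0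
  · rw [if_pos h]
    show (((PySem.List.pyRange 0 ((PySem.List.pyGetD matrix 0 []).length) 1).map
        (fun j => 0 + (matrix.map (fun r => PySem.List.pyGetD r j 0)).sum)).all
        (fun s => s == 2)) = true ↔ _
    simp only [List.all_eq_true, List.forall_mem_map, zero_add, beq_iff_eq]
    exact ⟨fun hall => ⟨h, hall⟩, fun hc => hc.2⟩
  · rw [if_neg h]
    show false = true ↔ _
    simp only [Bool.false_eq_true, false_iff]
    exact fun hc => h hc.1

-- ===== VERDICT (by name: the statement is the Claim_ definition above) =====
theorem provjera_spec : Claim_equal_provjera := by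
  intro matrix _ _
  unfold Spec_provjera
  rw [Bool.eq_iff_iff, provjera_true_iff, provjera_alt_true_iff]
  constructor
  · intro h
    exact ⟨fun r hr j hj => (h j hj).1 r hr, fun j hj => (h j hj).2⟩
  · intro ⟨h1, h2⟩ j hj
    exact ⟨fun r hr => h1 r hr j hj, h2 j hj⟩
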